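-- pv_equiv track=rewrite | github.com/challengers-algorithm/algorithm | yechankun/230117_yechankun_programmers_숫자 게임.py | solution
-- ===== SOURCE A (Python) =====
-- def solution(A, B):
--     answer = 0
--     A.sort()
--     B.sort()
--     N = len(A)
--     aIdx, bIdx = 0, 0
--     while aIdx < N and bIdx < N:
--         if A[aIdx] < B[bIdx]:
--             answer += 1
--             bIdx += 1
--         else:
--             aIdx -= 1
--             bIdx += 1
--         aIdx += 1
--     return answer
-- ===== SOURCE B (Python) =====
-- def solution(A, B):
--     # Characterisation: the greedy win count equals the largest k such that the
--     # k largest of B's first len(A) sorted values pairwise beat the k smallest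
--     # values of A; that predicate is monotone in k, so binary-search it.
--     A.sort()
--     B.sort()
--     n = len(A)
--     C = B[:n]
--
--     def ok(k):
--         return all(A[i] < C[n - k + i] for i in range(k))
--
--     lo, hi = 0, n
--     while lo < hi:
--         mid = (lo + hi + 1) // 2
--         if ok(mid):
--             lo = mid
--         else:
--             hi = mid - 1
--     return lo
-- ===== Notes on version B (the rewrite author's own statement) =====
-- stated objective: alternative
-- what changed: Replaces A's linear two-pointer greedy scan with a binary search over the answer k, using the characterisation that the greedy win count is the largest k for which the k largest of B's first len(A) sorted values pairwise beat the k smallest of A (a monotone predicate checked with all()); no greedy pass remains.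
import Mathlib
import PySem

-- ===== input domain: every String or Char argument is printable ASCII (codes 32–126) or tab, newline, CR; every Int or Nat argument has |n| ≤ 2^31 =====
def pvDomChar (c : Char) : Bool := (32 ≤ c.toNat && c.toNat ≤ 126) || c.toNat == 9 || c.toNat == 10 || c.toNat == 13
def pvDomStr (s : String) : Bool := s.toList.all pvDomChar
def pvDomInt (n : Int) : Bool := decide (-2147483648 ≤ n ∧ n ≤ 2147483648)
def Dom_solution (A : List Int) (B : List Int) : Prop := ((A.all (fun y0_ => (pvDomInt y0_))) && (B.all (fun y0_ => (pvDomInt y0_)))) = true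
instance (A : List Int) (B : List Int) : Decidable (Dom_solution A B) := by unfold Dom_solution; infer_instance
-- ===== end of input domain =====

-- B replaces A's two-pointer greedy scan by a binary search over the answer k,
-- checking the pairwise condition 'the k largest of B's first len(A) sorted values
-- beat the k smallest of A' (objective: alternative; same asymptotic cost).
-- Both A and B sort their list arguments in place; the equivalence proved here is
-- about the return value.

-- ===== PORT A =====
-- while aIdx < N and bIdx < N: compare A[aIdx] and B[bIdx].  'fuel' only makes the
-- recursion structural (N iterations always suffice: bIdx rises by 1 every turn); the
-- unreachable index-error case (B shorter than A, excluded by Pre_) returns the accumulator.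
def solLoopA (As Bs : List Int) (N : Int) : Nat → Int → Int → Int → Int
  | 0, _, _, answer => answer
  | fuel + 1, aIdx, bIdx, answer =>
    if aIdx < N ∧ bIdx < N then
      match PySem.List.pyGet? As aIdx, PySem.List.pyGet? Bs bIdx with
      | some a, some b =>
          if a < b then solLoopA As Bs N fuel (aIdx + 1) (bIdx + 1) (answer + 1)
          else solLoopA As Bs N fuel aIdx (bIdx + 1) answer
      | _, _ => answer
    else answer

def solution (A : List Int) (B : List Int) : Int :=
  let As := PySem.List.sorted A (fun x => x) false
  let Bs := PySem.List.sorted B (fun x => x) false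
  let N : Int := (As.length : Int)
  solLoopA As Bs N As.length 0 0 0

-- ===== PORT B =====
-- ok(k) = all(A[i] < C[n-k+i] for i in range(k)); exact for in-range indices (the only
-- case reachable under Pre_: there 0 ≤ n-k+i < len C); 'false' stands for the IndexError.
def okB (As Cs : List Int) (n k : Int) : Bool :=
  (PySem.List.pyRange 0 k 1).all (fun i =>
    match PySem.List.pyGet? As i, PySem.List.pyGet? Cs (n - k + i) with
    | some a, some b => decide (a < b)
    | _, _ => false)

-- while lo < hi: mid = (lo+hi+1)//2; binary search on ok.  'fuel' only makes the
-- recursion structural (hi - lo shrinks every turn, so len(A)+1 always suffices).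
def bsLoopB (As Cs : List Int) (n : Int) : Nat → Int → Int → Int
  | 0, lo, _ => lo
  | fuel + 1, lo, hi =>
    if lo < hi then
      let mid := PySem.Int.floordiv (lo + hi + 1) 2
      if okB As Cs n mid then bsLoopB As Cs n fuel mid hi
      else bsLoopB As Cs n fuel lo (mid - 1)
    else lo

def solution_alt (A : List Int) (B : List Int) : Int :=
  let As := PySem.List.sorted A (fun x => x) false
  let Bs := PySem.List.sorted B (fun x => x) false
  let n : Int := (As.length : Int)
  let Cs := PySem.List.slice Bs none (some n)
  bsLoopB As Cs n (As.length + 1) 0 n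

-- ===== PRECONDITION & SPEC =====
-- Pre_ excludes len(B) < len(A): there A's loop reads B[bIdx] past the end of B and
-- raises IndexError (B's check reads C[n-1] past the end of C and raises there as well).
def Pre_solution (A : List Int) (B : List Int) : Prop := A.length ≤ B.length
instance (A : List Int) (B : List Int) : Decidable (Pre_solution A B) := by
  unfold Pre_solution; infer_instance

def pvWitness_solution : List Int × List Int := ([3, 1, 5, 7], [2, 2, 6, 8])

def Spec_solution (A : List Int) (B : List Int) (out : Int) : Prop := out = solution_alt A B
instance (A : List Int) (B : List Int) (out : Int) : Decidable (Spec_solution A B out) := by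
  unfold Spec_solution; infer_instance

-- ===== CLAIM (what is proved, stated in full; the proofs are below) =====
def Claim_equal_solution : Prop := ∀ (A : List Int) (B : List Int), Dom_solution A B → Pre_solution A B → Spec_solution A B (solution A B)

-- ===== LEMMAS AND PROOFS =====

-- The greedy count, as a function on the two sorted lists (characterises loop A).
def fGreedy : List Int → List Int → Nat
  | _, [] => 0
  | [], _ => 0
  | a :: as, b :: bs => if a < b then 1 + fGreedy as bs else fGreedy (a :: as) bs

lemma fGreedy_nil_left (ys : List Int) : fGreedy [] ys = 0 := by
  cases ys <;> simp [fGreedy]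

lemma fGreedy_nil_right (xs : List Int) : fGreedy xs [] = 0 := by
  cases xs <;> simp [fGreedy]

-- Feasibility of a count k: the k largest of Y pairwise beat the k smallest of X.
def Feas (X Y : List Int) (k : Nat) : Prop :=
  k ≤ X.length ∧ k ≤ Y.length ∧ ∀ i < k, X.getD i 0 < Y.getD (Y.length - k + i) 0

-- Loop A computes the greedy count on the remaining suffixes.
lemma solLoopA_eq (As Bs : List Int) (hlen : As.length ≤ Bs.length) :
    ∀ (fuel : Nat) (aIdx bIdx ans : Int), ((As.length : Int) - bIdx).toNat ≤ fuel →
    0 ≤ aIdx → 0 ≤ bIdx →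
    solLoopA As Bs (As.length : Int) fuel aIdx bIdx ans
      = ans + (fGreedy (As.drop aIdx.toNat) ((Bs.take As.length).drop bIdx.toNat) : Int) := by
  intro fuel
  induction fuel with
  | zero =>
      intro aIdx bIdx ans hk ha hb
      have hdrop : (Bs.take As.length).drop bIdx.toNat = [] := by
        apply List.drop_eq_nil_of_le
        simp; omega
      rw [solLoopA, hdrop, fGreedy_nil_right]; simp
  | succ fuel ihk =>
      intro aIdx bIdx ans hk ha hb
      by_cases hbN : bIdx < (As.length : Int)
      · by_cases haN : aIdx < (As.length : Int)
        · rw [solLoopA, if_pos ⟨haN, hbN⟩]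
          have haN' : aIdx.toNat < As.length := by omega
          have hbB : bIdx.toNat < Bs.length := by omega
          have hga : PySem.List.pyGet? As aIdx = some As[aIdx.toNat] :=
            PySem.List.pyGet?_eq_some_getElem As ha (by omega)
          have hgb : PySem.List.pyGet? Bs bIdx = some Bs[bIdx.toNat] :=
            PySem.List.pyGet?_eq_some_getElem Bs hb (by omega)
          rw [hga, hgb]
          dsimp only
          have hdA : As.drop aIdx.toNat = As[aIdx.toNat] :: As.drop (aIdx.toNat + 1) :=
            List.drop_eq_getElem_cons haN'
          have hbT : bIdx.toNat < (Bs.take As.length).length := by simp; omega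
          have hdB : (Bs.take As.length).drop bIdx.toNat
              = Bs[bIdx.toNat] :: (Bs.take As.length).drop (bIdx.toNat + 1) := by
            rw [List.drop_eq_getElem_cons hbT, List.getElem_take]
          have h1 : (aIdx + 1).toNat = aIdx.toNat + 1 := by omega
          have h2 : (bIdx + 1).toNat = bIdx.toNat + 1 := by omega
          by_cases hc : As[aIdx.toNat] < Bs[bIdx.toNat]
          · rw [if_pos hc, ihk (aIdx + 1) (bIdx + 1) (ans + 1) (by omega) (by omega) (by omega)]
            rw [hdA, hdB, fGreedy, if_pos hc, h1, h2]
            push_cast; ring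
          · rw [if_neg hc, ihk aIdx (bIdx + 1) ans (by omega) ha (by omega)]
            rw [hdA, hdB, fGreedy, if_neg hc, h2, ← hdA]
        · rw [solLoopA, if_neg (by omega)]
          have hdrop : As.drop aIdx.toNat = [] := by
            apply List.drop_eq_nil_of_le; omega
          rw [hdrop, fGreedy_nil_left]; simp
      · rw [solLoopA, if_neg (by omega)]
        have hdrop : (Bs.take As.length).drop bIdx.toNat = [] := by
          apply List.drop_eq_nil_of_le
          simp; omega
        rw [hdrop, fGreedy_nil_right]; simp

-- The greedy count is feasible (only sortedness of Y is needed).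
lemma fGreedy_feas : ∀ (Y X : List Int), Y.Pairwise (· ≤ ·) → Feas X Y (fGreedy X Y) := by
  intro Y
  induction Y with
  | nil =>
      intro X _
      rw [fGreedy_nil_right]
      exact ⟨Nat.zero_le _, Nat.zero_le _, fun i hi => by omega⟩
  | cons b bs ih =>
      intro X hY
      have hb : ∀ y ∈ bs, b ≤ y := (List.pairwise_cons.mp hY).1
      have hbs : bs.Pairwise (· ≤ ·) := (List.pairwise_cons.mp hY).2
      cases X with
      | nil =>
          rw [fGreedy_nil_left]
          exact ⟨Nat.zero_le _, Nat.zero_le _, fun i hi => by omega⟩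
      | cons a as =>
          by_cases hab : a < b
          · obtain ⟨h1, h2, h3⟩ := ih as hbs
            rw [fGreedy, if_pos hab]
            refine ⟨by simp; omega, by simp; omega, ?_⟩
            intro i hi
            have hidx : (b :: bs).length - (1 + fGreedy as bs) + i
                = bs.length - fGreedy as bs + i := by simp; omega
            rw [hidx]
            cases i with
            | zero =>
                simp only [List.getD_cons_zero]
                rcases Nat.eq_or_lt_of_le h2 with heq | hlt
                · have : bs.length - fGreedy as bs + 0 = 0 := by omega
                  rw [this]; simpa using hab
                · have hm : bs.length - fGreedy as bs + 0 = (bs.length - fGreedy as bs - 1) + 1 := by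
                    omega
                  rw [hm, List.getD_cons_succ]
                  have hmem : bs.getD (bs.length - fGreedy as bs - 1) 0 ∈ bs := by
                    rw [List.getD_eq_getElem bs 0 (by omega)]
                    exact List.getElem_mem _
                  exact lt_of_lt_of_le hab (hb _ hmem)
            | succ j =>
                have hmj : bs.length - fGreedy as bs + (j + 1)
                    = (bs.length - fGreedy as bs + j) + 1 := by omega
                rw [hmj, List.getD_cons_succ, List.getD_cons_succ]
                exact h3 j (by omega)
          · obtain ⟨h1, h2, h3⟩ := ih (a :: as) hbs
            rw [fGreedy, if_neg hab]
            refine ⟨h1, by simp; omega, ?_⟩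
            intro i hi
            have hidx : (b :: bs).length - fGreedy (a :: as) bs + i
                = (bs.length - fGreedy (a :: as) bs + i) + 1 := by simp; omega
            rw [hidx, List.getD_cons_succ]
            exact h3 i hi

-- Every feasible count is at most the greedy count (no sortedness needed).
lemma feas_le_fGreedy : ∀ (Y X : List Int) (k : Nat), Feas X Y k → k ≤ fGreedy X Y := by
  intro Y
  induction Y with
  | nil => intro X k hk; have := hk.2.1; simp at this; omega
  | cons b bs ih =>
      intro X k hk
      cases X with
      | nil => have := hk.1; simp at this; omega
      | cons a as =>
          obtain ⟨h1, h2, h3⟩ := hk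
          by_cases hab : a < b
          · rw [fGreedy, if_pos hab]
            cases k with
            | zero => omega
            | succ k' =>
                have hfe : Feas as bs k' := by
                  refine ⟨by simp at h1; omega, by simp at h2; omega, ?_⟩
                  intro j hj
                  have := h3 (j + 1) (by omega)
                  have hidx : (b :: bs).length - (k' + 1) + (j + 1)
                      = (bs.length - k' + j) + 1 := by simp at h2 ⊢; omega
                  rw [hidx, List.getD_cons_succ, List.getD_cons_succ] at this
                  exact this
                have := ih as k' hfe
                omega
          · rw [fGreedy, if_neg hab]
            have hkbs : k ≤ bs.length := by
              by_contra hgt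
              have hk1 : k = bs.length + 1 := by simp at h2; omega
              have := h3 0 (by omega)
              have hidx : (b :: bs).length - k + 0 = 0 := by simp; omega
              rw [hidx] at this
              simp at this
              omega
            apply ih (a :: as) k
            refine ⟨h1, hkbs, ?_⟩
            intro i hi
            have := h3 i hi
            have hidx : (b :: bs).length - k + i = (bs.length - k + i) + 1 := by
              simp; omega
            rw [hidx, List.getD_cons_succ] at this
            exact this

-- Feasibility is downward closed when Y is sorted.
lemma feas_pred (X Y : List Int) (k : Nat) (hY : Y.Pairwise (· ≤ ·))
    (h : Feas X Y (k + 1)) : Feas X Y k := by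
  obtain ⟨h1, h2, h3⟩ := h
  refine ⟨by omega, by omega, ?_⟩
  intro i hi
  have ha := h3 i (by omega)
  have hm : Y.length - (k + 1) + i < Y.length := by omega
  have hm1 : Y.length - k + i < Y.length := by omega
  have hstep : Y.length - k + i = (Y.length - (k + 1) + i) + 1 := by omega
  have hle : Y.getD (Y.length - (k + 1) + i) 0 ≤ Y.getD (Y.length - k + i) 0 := by
    rw [List.getD_eq_getElem Y 0 hm, List.getD_eq_getElem Y 0 hm1]
    exact List.pairwise_iff_getElem.mp hY _ _ hm hm1 (by omega)
  exact lt_of_lt_of_le ha hle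

lemma feas_mono (X Y : List Int) (hY : Y.Pairwise (· ≤ ·)) :
    ∀ (k j : Nat), j ≤ k → Feas X Y k → Feas X Y j := by
  intro k
  induction k with
  | zero => intro j hj h; have : j = 0 := by omega
            rw [this]; exact h
  | succ k' ihk =>
      intro j hj h
      rcases Nat.eq_or_lt_of_le hj with heq | hlt
      · rw [heq]; exact h
      · exact ihk j (by omega) (feas_pred X Y k' hY h)

-- The port's ok-check decides feasibility (equal-length lists, k in range).
lemma okB_iff_feas (As Cs : List Int) (k : Int) (hlen : Cs.length = As.length)
    (h0 : 0 ≤ k) (hk : k ≤ (As.length : Int)) :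
    okB As Cs (As.length : Int) k = true ↔ Feas As Cs k.toNat := by
  unfold okB
  rw [PySem.List.pyRange_one]
  simp only [List.all_eq_true, List.mem_map, List.mem_range, Int.sub_zero]
  constructor
  · intro hall
    refine ⟨by omega, by omega, ?_⟩
    intro j hj
    have := hall (0 + (j : Int)) ⟨j, hj, rfl⟩
    have hga : PySem.List.pyGet? As (0 + (j : Int)) = some As[j] := by
      rw [zero_add, PySem.List.pyGet?_natCast, List.getElem?_eq_getElem (by omega)]
    have hidx0 : (0 ≤ (As.length : Int) - k + (0 + (j : Int))) := by omega
    have hidx1 : ((As.length : Int) - k + (0 + (j : Int)) < (Cs.length : Int)) := by omega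
    have hgb := PySem.List.pyGet?_eq_some_getElem Cs hidx0 hidx1
    rw [hga, hgb] at this
    simp only [decide_eq_true_eq] at this
    have hT : ((As.length : Int) - k + (0 + (j : Int))).toNat = Cs.length - k.toNat + j := by
      omega
    simp only [hT] at this
    rw [List.getD_eq_getElem As 0 (by omega), List.getD_eq_getElem Cs 0 (by omega)]
    exact this
  · intro ⟨hf1, hf2, hf3⟩ x hx
    obtain ⟨j, hj, rfl⟩ := hx
    have hga : PySem.List.pyGet? As (0 + (j : Int)) = some As[j] := by
      rw [zero_add, PySem.List.pyGet?_natCast, List.getElem?_eq_getElem (by omega)]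
    have hidx0 : (0 ≤ (As.length : Int) - k + (0 + (j : Int))) := by omega
    have hidx1 : ((As.length : Int) - k + (0 + (j : Int)) < (Cs.length : Int)) := by omega
    have hgb := PySem.List.pyGet?_eq_some_getElem Cs hidx0 hidx1
    rw [hga, hgb]
    simp only [decide_eq_true_eq]
    have := hf3 j hj
    rw [List.getD_eq_getElem As 0 (by omega), List.getD_eq_getElem Cs 0 (by omega)] at this
    have hT : ((As.length : Int) - k + (0 + (j : Int))).toNat = Cs.length - k.toNat + j := by
      omega
    simp only [hT]
    exact this

-- Binary-search invariant: with g feasible-maximal and ok downward closed up to g,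
-- the loop converges to g.
lemma bsLoopB_eq (As Cs : List Int) (n g : Int)
    (hub : ∀ k, 0 ≤ k → k ≤ n → okB As Cs n k = true → k ≤ g)
    (hdc : ∀ j, 0 ≤ j → j ≤ g → okB As Cs n j = true) :
    ∀ (fuel : Nat) (lo hi : Int), (hi - lo).toNat ≤ fuel →
    0 ≤ lo → lo ≤ g → g ≤ hi → hi ≤ n →
    bsLoopB As Cs n fuel lo hi = g := by
  intro fuel
  induction fuel with
  | zero =>
      intro lo hi hf h0 hlg hgh hhn
      rw [bsLoopB]; omega
  | succ fuel ihk =>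
      intro lo hi hf h0 hlg hgh hhn
      by_cases hlh : lo < hi
      · rw [bsLoopB, if_pos hlh]
        have hdiv : PySem.Int.floordiv (lo + hi + 1) 2 = (lo + hi + 1) / 2 :=
          PySem.Int.floordiv_eq_ediv_of_pos (by omega)
        have hmid1 : lo < PySem.Int.floordiv (lo + hi + 1) 2 := by rw [hdiv]; omega
        have hmid2 : PySem.Int.floordiv (lo + hi + 1) 2 ≤ hi := by rw [hdiv]; omega
        by_cases hok : okB As Cs n (PySem.Int.floordiv (lo + hi + 1) 2) = true
        · rw [if_pos hok]
          have hmg : PySem.Int.floordiv (lo + hi + 1) 2 ≤ g :=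
            hub _ (by omega) (by omega) hok
          exact ihk _ hi (by omega) (by omega) hmg hgh hhn
        · rw [if_neg hok]
          have hgm : g ≤ PySem.Int.floordiv (lo + hi + 1) 2 - 1 := by
            by_contra hcon
            exact hok (hdc _ (by omega) (by omega))
          exact ihk lo _ (by omega) h0 hlg hgm (by omega)
      · rw [bsLoopB, if_neg hlh]; omega

-- ===== VERDICT (by name: the statement is the Claim_ definition above) =====
theorem solution_spec : Claim_equal_solution := by
  intro A B _ hpre
  unfold Spec_solution solution solution_alt
  set As := PySem.List.sorted A (fun x => x) false with hAs
  set Bs := PySem.List.sorted B (fun x => x) false with hBs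
  have hlen : As.length ≤ Bs.length := by
    simpa [hAs, hBs, PySem.List.length_sorted] using hpre
  have hslice : PySem.List.slice Bs none (some ((As.length : Int))) = Bs.take As.length :=
    PySem.List.slice_to_natCast Bs As.length
  dsimp only
  rw [hslice]
  set Cs := Bs.take As.length with hCs
  have hlenC : Cs.length = As.length := by simp [hCs]; omega
  have hCsort : Cs.Pairwise (· ≤ ·) := by
    apply List.Pairwise.take
    have := PySem.List.sorted_pairwise (xs := B) (key := fun x => x)
    simpa [hBs] using this
  set g := fGreedy As Cs with hg
  have hA := solLoopA_eq As Bs hlen As.length 0 0 0 (by omega) le_rfl le_rfl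
  rw [Int.toNat_zero, List.drop_zero, List.drop_zero, zero_add, ← hCs, ← hg] at hA
  rw [hA]
  have hfeas : Feas As Cs g := fGreedy_feas Cs As hCsort
  have hgA : g ≤ As.length := hfeas.1
  apply Eq.symm
  apply bsLoopB_eq As Cs (As.length : Int) (g : Int)
  · intro k hk0 hkn hok
    have := feas_le_fGreedy Cs As k.toNat ((okB_iff_feas As Cs k hlenC hk0 hkn).mp hok)
    omega
  · intro j hj0 hjg
    apply (okB_iff_feas As Cs j hlenC hj0 (by omega)).mpr
    exact feas_mono As Cs hCsort g j.toNat (by omega) hfeas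
  · omega
  · omega
  · omega
  · omega
  · omega
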